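-- pv_equiv track=rewrite | github.com/Kanken6174/VSB | ltasm.py | preprocess_vhdl
-- ===== SOURCE A (Python) =====
-- def preprocess_vhdl(text):
--     lines=text.split('\n')
--     out=[]
--     for line in lines:
--         idx=line.find('--')
--         if idx!=-1:
--             line=line[:idx]
--         out.append(line)
--     # remove any leftover inline comments, unify whitespace
--     return '\n'.join(out)
-- ===== SOURCE B (Python) =====
-- def preprocess_vhdl(text):
--     # Single left-to-right scan: copy chars, and on '--' skip to the next newline.
--     out = []
--     i = 0
--     n = len(text)
--     while i < n:
--         if text[i] == '-' and i + 1 < n and text[i + 1] == '-':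
--             i += 2
--             while i < n and text[i] != '\n':
--                 i += 1
--         else:
--             out.append(text[i])
--             i += 1
--     return ''.join(out)
-- ===== Notes on version B (the rewrite author's own statement) =====
-- stated objective: alternative
-- what changed: Replaces A's split-into-lines / find-comment-per-line / join pipeline by a single left-to-right scan over the text that copies characters and, at a comment start (two dashes), skips ahead to the next newline; no line list is ever built.
import Mathlib
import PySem

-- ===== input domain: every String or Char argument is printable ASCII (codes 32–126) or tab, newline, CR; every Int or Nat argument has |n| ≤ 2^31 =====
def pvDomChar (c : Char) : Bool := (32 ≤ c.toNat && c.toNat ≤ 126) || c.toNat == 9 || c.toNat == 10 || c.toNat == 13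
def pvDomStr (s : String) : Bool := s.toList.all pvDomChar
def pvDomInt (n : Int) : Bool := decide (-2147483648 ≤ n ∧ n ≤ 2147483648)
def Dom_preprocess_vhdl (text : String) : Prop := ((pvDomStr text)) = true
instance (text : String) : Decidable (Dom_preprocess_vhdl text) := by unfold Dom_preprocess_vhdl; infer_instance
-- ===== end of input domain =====

-- B replaces A's split / per-line find / join pipeline by one left-to-right scan that copies
-- characters and, at a comment start (two dashes), skips to the next newline (objective: alternative, same cost).

-- ===== PORT A =====
def preprocess_vhdl (text : String) : String :=
  let lines := (PySem.Str.split? text "\n").getD []   -- text.split('\n'); sep is non-empty, so split? never fails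
  let out := lines.foldl (fun out line =>
    let idx := PySem.Str.find line "--"
    let line := if idx ≠ -1 then PySem.Str.slice line none (some idx) else line
    out ++ [line]) ([] : List String)
  PySem.Str.join "\n" out

-- ===== PORT B =====
-- inner `while i < n and text[i] != '\n'` loop of B
def pvSkip (r : List Char) : List Char := r.dropWhile (fun c => c ≠ '\n')

-- outer `while i < n` loop of B: copy the char, or on '--' skip to the next '\n'
def pvStrip : List Char → List Char
  | [] => []
  | c :: r =>
    if c = '-' ∧ r.head? = some '-' then pvStrip (pvSkip r.tail)
    else c :: pvStrip r
termination_by l => l.length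
decreasing_by
  · have h1 := List.length_dropWhile_le (fun c => decide (c ≠ '\n')) r.tail
    have h2 : r.tail.length = r.length - 1 := List.length_tail
    simp only [pvSkip, List.length_cons]
    omega
  · simp only [List.length_cons]; omega

def preprocess_vhdl_alt (text : String) : String := String.ofList (pvStrip text.toList)

-- ===== PRECONDITION & SPEC =====
def Spec_preprocess_vhdl (text : String) (out : String) : Prop := out = preprocess_vhdl_alt text
instance (text : String) (out : String) : Decidable (Spec_preprocess_vhdl text out) := by unfold Spec_preprocess_vhdl; infer_instance

-- ===== CLAIM (what is proved, stated in full; the proofs are below) =====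
def Claim_equal_preprocess_vhdl : Prop := ∀ (text : String), Dom_preprocess_vhdl text → Spec_preprocess_vhdl text (preprocess_vhdl text)

-- ===== LEMMAS AND PROOFS =====

-- what A does to one line, on the char-list side
def pvLineA (l : List Char) : List Char :=
  if PySem.Chars.find l ['-', '-'] ≠ -1 then
    PySem.List.slice l none (some (PySem.Chars.find l ['-', '-']))
  else l

-- equations of pvStrip (well-founded definition, so named once here)
theorem pvStrip_nil : pvStrip [] = [] := by rw [pvStrip]

theorem pvStrip_cons (c : Char) (r : List Char) :
    pvStrip (c :: r) =
      if c = '-' ∧ r.head? = some '-' then pvStrip (pvSkip r.tail) else c :: pvStrip r := by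
  rw [pvStrip]

-- --- equations for PySem.Chars.splitOn.go at sep = ['\n'] ---
theorem pvGo_zero (l cur : List Char) (acc : List (List Char)) :
    PySem.Chars.splitOn.go ['\n'] 0 l cur acc = ((cur.reverse ++ l) :: acc).reverse := rfl

theorem pvGo_nil (f : Nat) (cur : List Char) (acc : List (List Char)) :
    PySem.Chars.splitOn.go ['\n'] f [] cur acc = (cur.reverse :: acc).reverse := by
  cases f <;> simp [PySem.Chars.splitOn.go]

theorem pvGo_cons (f : Nat) (c : Char) (r cur : List Char) (acc : List (List Char)) :
    PySem.Chars.splitOn.go ['\n'] (f+1) (c::r) cur acc =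
      if c = '\n' then PySem.Chars.splitOn.go ['\n'] f r [] (cur.reverse :: acc)
      else PySem.Chars.splitOn.go ['\n'] f r (c::cur) acc := by
  by_cases hc : c = '\n'
  · subst hc; simp [PySem.Chars.splitOn.go, List.isPrefixOf]
  · have hb : ('\n' == c) = false := beq_eq_false_iff_ne.mpr (Ne.symm hc)
    rw [if_neg hc]
    simp [PySem.Chars.splitOn.go, List.isPrefixOf, hb]

theorem pvGo_acc (l : List Char) : ∀ (f : Nat) (cur : List Char) (acc : List (List Char)),
    PySem.Chars.splitOn.go ['\n'] f l cur acc =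
      acc.reverse ++ PySem.Chars.splitOn.go ['\n'] f l cur [] := by
  induction l with
  | nil => intro f cur acc; simp [pvGo_nil]
  | cons c r ih =>
    intro f cur acc
    cases f with
    | zero => simp [pvGo_zero]
    | succ f =>
      rw [pvGo_cons, pvGo_cons]
      by_cases hc : c = '\n'
      · rw [if_pos hc, if_pos hc, ih f [] (cur.reverse :: acc), ih f [] [cur.reverse]]
        simp
      · rw [if_neg hc, if_neg hc]
        exact ih f (c::cur) acc

theorem pvGo_noNL (l : List Char) : ∀ (f : Nat) (cur : List Char) (acc : List (List Char)),
    '\n' ∉ l → l.length ≤ f →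
    PySem.Chars.splitOn.go ['\n'] f l cur acc = acc.reverse ++ [cur.reverse ++ l] := by
  induction l with
  | nil => intro f cur acc _ _; rw [pvGo_nil]; simp
  | cons c r ih =>
    intro f cur acc hnl hf
    simp only [List.length_cons] at hf
    obtain ⟨g, rfl⟩ : ∃ g, f = g + 1 := ⟨f - 1, by omega⟩
    rw [pvGo_cons]
    have hc : c ≠ '\n' := fun h => hnl (h ▸ List.mem_cons_self ..)
    rw [if_neg hc, ih g (c::cur) acc (fun h => hnl (List.mem_cons_of_mem _ h)) (by omega)]
    simp

theorem pvGo_cut (l : List Char) : ∀ (f : Nat) (rest cur : List Char) (acc : List (List Char)),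
    '\n' ∉ l →
    PySem.Chars.splitOn.go ['\n'] (l.length + (f+1)) (l ++ '\n' :: rest) cur acc =
      PySem.Chars.splitOn.go ['\n'] f rest [] ((cur.reverse ++ l) :: acc) := by
  induction l with
  | nil => intro f rest cur acc _; simp [pvGo_cons]
  | cons c l' ih =>
    intro f rest cur acc hnl
    have hc : c ≠ '\n' := fun h => hnl (h ▸ List.mem_cons_self ..)
    have hlen : (c :: l').length + (f+1) = (l'.length + (f+1)) + 1 := by
      simp only [List.length_cons]; omega
    rw [hlen, List.cons_append, pvGo_cons, if_neg hc,
      ih f rest (c::cur) acc (fun h => hnl (List.mem_cons_of_mem _ h))]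
    simp

theorem pvGo_ne_nil (l : List Char) : ∀ (f : Nat) (cur : List Char) (acc : List (List Char)),
    PySem.Chars.splitOn.go ['\n'] f l cur acc ≠ [] := by
  induction l with
  | nil => intro f cur acc; rw [pvGo_nil]; simp
  | cons c r ih =>
    intro f cur acc
    cases f with
    | zero => rw [pvGo_zero]; simp
    | succ f =>
      rw [pvGo_cons]
      by_cases hc : c = '\n'
      · rw [if_pos hc]; exact ih f [] _
      · rw [if_neg hc]; exact ih f (c::cur) acc

theorem pvSplitOn_eq_go (s : List Char) :
    PySem.Chars.splitOn s ['\n'] = PySem.Chars.splitOn.go ['\n'] (s.length + 1) s [] [] := rfl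

theorem pvSplitOn_noNL (l : List Char) (hnl : '\n' ∉ l) :
    PySem.Chars.splitOn l ['\n'] = [l] := by
  rw [pvSplitOn_eq_go, pvGo_noNL l _ [] [] hnl (by omega)]
  simp

theorem pvSplitOn_cut (l rest : List Char) (hnl : '\n' ∉ l) :
    PySem.Chars.splitOn (l ++ '\n' :: rest) ['\n'] = l :: PySem.Chars.splitOn rest ['\n'] := by
  rw [pvSplitOn_eq_go, pvSplitOn_eq_go]
  have hlen : (l ++ '\n' :: rest).length + 1 = l.length + ((rest.length + 1) + 1) := by
    simp only [List.length_append, List.length_cons]; omega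
  rw [hlen, pvGo_cut l (rest.length + 1) rest [] [] hnl, pvGo_acc]
  simp

theorem pvSplitOn_ne_nil (s : List Char) : PySem.Chars.splitOn s ['\n'] ≠ [] := by
  rw [pvSplitOn_eq_go]; exact pvGo_ne_nil s _ [] []

-- --- find facts for the pattern "--" ---
theorem pvFind_prefix_zero (l : List Char) (h : ['-', '-'] <+: l) :
    PySem.Chars.find l ['-', '-'] = 0 := by
  have h0 : 0 ≤ PySem.Chars.find l ['-', '-'] :=
    (PySem.Chars.find_nonneg_iff _ _).2 h.isInfix
  have hs := PySem.Chars.find_spec (s := l) (sub := ['-', '-']) h0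
  by_contra hne
  have hpos : 0 < (PySem.Chars.find l ['-', '-']).toNat := by omega
  exact hs.2 0 hpos (by simpa using h)

theorem pvFind_cons (c : Char) (r : List Char) (h : ¬ (['-', '-'] <+: (c :: r))) :
    PySem.Chars.find (c :: r) ['-', '-'] =
      if PySem.Chars.find r ['-', '-'] = -1 then -1 else PySem.Chars.find r ['-', '-'] + 1 := by
  by_cases hr : PySem.Chars.find r ['-', '-'] = -1
  · rw [if_pos hr]
    have hnr : ¬ ['-', '-'] <:+: r := (PySem.Chars.find_eq_neg_one_iff _ _).1 hr
    refine (PySem.Chars.find_eq_neg_one_iff _ _).2 ?_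
    rw [List.infix_cons_iff]
    rintro (h1 | h2)
    · exact h h1
    · exact hnr h2
  · rw [if_neg hr]
    have hk : 0 ≤ PySem.Chars.find r ['-', '-'] := by
      have := PySem.Chars.neg_one_le_find r ['-', '-']; omega
    have hspecr := PySem.Chars.find_spec (s := r) (sub := ['-', '-']) hk
    have hinf : ['-', '-'] <:+: (c :: r) := by
      rw [List.infix_cons_iff]
      exact Or.inr ((PySem.Chars.find_ne_neg_one_iff _ _).1 hr)
    have hm : 0 ≤ PySem.Chars.find (c :: r) ['-', '-'] :=
      (PySem.Chars.find_nonneg_iff _ _).2 hinf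
    have hspecm := PySem.Chars.find_spec (s := c :: r) (sub := ['-', '-']) hm
    have hle : (PySem.Chars.find (c :: r) ['-', '-']).toNat ≤
        (PySem.Chars.find r ['-', '-']).toNat + 1 := by
      by_contra hgt
      exact hspecm.2 ((PySem.Chars.find r ['-', '-']).toNat + 1) (by omega)
        (by rw [List.drop_succ_cons]; exact hspecr.1)
    have hne0 : (PySem.Chars.find (c :: r) ['-', '-']).toNat ≠ 0 := by
      intro h0
      exact h (by simpa [h0] using hspecm.1)
    have hge : (PySem.Chars.find r ['-', '-']).toNat + 1 ≤
        (PySem.Chars.find (c :: r) ['-', '-']).toNat := by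
      by_contra hlt
      refine hspecr.2 ((PySem.Chars.find (c :: r) ['-', '-']).toNat - 1) (by omega) ?_
      have hp := hspecm.1
      rwa [show (PySem.Chars.find (c :: r) ['-', '-']).toNat =
        ((PySem.Chars.find (c :: r) ['-', '-']).toNat - 1) + 1 by omega,
        List.drop_succ_cons] at hp
    omega

-- --- per-line behaviour of pvStrip ---
theorem pvStrip_noNL (n : Nat) : ∀ (l : List Char), l.length ≤ n → '\n' ∉ l →
    pvStrip l = pvLineA l := by
  induction n with
  | zero =>
    intro l hl _
    cases l with
    | nil => rw [pvStrip_nil]; decide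
    | cons c r => exact absurd hl (by simp)
  | succ n ih =>
    intro l hl hnl
    cases l with
    | nil => rw [pvStrip_nil]; decide
    | cons c r =>
      by_cases hdd : ['-', '-'] <+: (c :: r)
      · obtain ⟨t, ht⟩ := hdd
        simp only [List.cons_append, List.nil_append, List.cons.injEq] at ht
        obtain ⟨h1, h2⟩ := ht
        subst h1; subst h2
        rw [pvStrip_cons, if_pos ⟨rfl, rfl⟩]
        have htl : pvSkip t = [] := by
          rw [pvSkip, List.dropWhile_eq_nil_iff]
          intro x hx
          simp only [ne_eq, decide_eq_true_eq]
          exact fun h => hnl (h ▸ List.mem_cons_of_mem _ (List.mem_cons_of_mem _ hx))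
        simp only [List.tail_cons, htl, pvStrip_nil]
        rw [pvLineA, pvFind_prefix_zero ('-' :: '-' :: t) ⟨t, rfl⟩, if_pos (by decide),
          PySem.List.slice_to _ (by norm_num)]
        simp
      · rw [pvStrip_cons]
        have hcnd : ¬ (c = '-' ∧ r.head? = some '-') := by
          rintro ⟨rfl, hh⟩
          cases r with
          | nil => simp at hh
          | cons c2 r2 =>
            simp only [List.head?_cons, Option.some.injEq] at hh
            exact hdd ⟨r2, by subst hh; rfl⟩
        rw [if_neg hcnd]
        have hlr : r.length ≤ n := by simp only [List.length_cons] at hl; omega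
        have hr : pvStrip r = pvLineA r := ih r hlr (fun h => hnl (List.mem_cons_of_mem _ h))
        rw [hr]
        by_cases hfr : PySem.Chars.find r ['-', '-'] = -1
        · simp [pvLineA, pvFind_cons c r hdd, hfr]
        · have hk : 0 ≤ PySem.Chars.find r ['-', '-'] := by
            have := PySem.Chars.neg_one_le_find r ['-', '-']; omega
          rw [pvLineA, pvLineA, pvFind_cons c r hdd]
          simp only [if_neg hfr]
          rw [if_pos hfr, if_pos (by omega : PySem.Chars.find r ['-', '-'] + 1 ≠ -1)]
          rw [PySem.List.slice_to _ hk, PySem.List.slice_to _ (by omega)]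
          rw [show ((PySem.Chars.find r ['-', '-']) + 1).toNat =
            (PySem.Chars.find r ['-', '-']).toNat + 1 by omega]
          rw [List.take_succ_cons]

-- pvStrip distributes over the first newline
theorem pvStrip_cut (l : List Char) : ∀ (rest : List Char), '\n' ∉ l →
    pvStrip (l ++ '\n' :: rest) = pvStrip l ++ '\n' :: pvStrip rest := by
  induction l with
  | nil =>
    intro rest _
    rw [List.nil_append, pvStrip_cons, if_neg (by simp), pvStrip_nil, List.nil_append]
  | cons c l' ih =>
    intro rest hnl
    have hnl' : '\n' ∉ l' := fun h => hnl (List.mem_cons_of_mem _ h)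
    by_cases hcnd : c = '-' ∧ l'.head? = some '-'
    · obtain ⟨hc, hh⟩ := hcnd
      subst hc
      cases l' with
      | nil => simp at hh
      | cons c2 l'' =>
        simp only [List.head?_cons, Option.some.injEq] at hh
        subst hh
        have hall : ∀ x ∈ l'', ¬ x = '\n' := by
          intro x hx h
          exact hnl (h ▸ List.mem_cons_of_mem _ (List.mem_cons_of_mem _ hx))
        have hdw : l''.dropWhile (fun c => decide (c ≠ '\n')) = [] := by
          rw [List.dropWhile_eq_nil_iff]
          intro x hx
          simpa using hall x hx
        rw [List.cons_append, List.cons_append,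
          pvStrip_cons '-' ('-' :: (l'' ++ '\n' :: rest)), if_pos ⟨rfl, rfl⟩,
          pvStrip_cons '-' ('-' :: l''), if_pos ⟨rfl, rfl⟩]
        simp only [List.tail_cons]
        have h1 : pvSkip (l'' ++ '\n' :: rest) = '\n' :: rest := by
          rw [pvSkip, List.dropWhile_append, hdw]
          simp
        have h2 : pvSkip l'' = [] := by rw [pvSkip, hdw]
        rw [h1, h2, pvStrip_nil, pvStrip_cons, if_neg (by simp), List.nil_append]
    · have hcnd2 : ¬ (c = '-' ∧ (l' ++ '\n' :: rest).head? = some '-') := by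
        rintro ⟨rfl, hh⟩
        cases l' with
        | nil =>
          simp only [List.nil_append, List.head?_cons, Option.some.injEq] at hh
          exact hnl (by rw [hh]; exact List.mem_cons_self ..)
        | cons c2 l'' =>
          exact hcnd ⟨rfl, by simpa using hh⟩
      rw [List.cons_append, pvStrip_cons c (l' ++ '\n' :: rest), if_neg hcnd2,
        pvStrip_cons c l', if_neg hcnd, ih rest hnl', List.cons_append]

-- main invariant: the single pass equals split / strip-each-line / join
theorem pvStrip_join (n : Nat) : ∀ (cs : List Char), cs.length ≤ n →
    pvStrip cs = PySem.Chars.join ['\n'] ((PySem.Chars.splitOn cs ['\n']).map pvLineA) := by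
  induction n with
  | zero =>
    intro cs hl
    cases cs with
    | nil => rw [pvStrip_nil]; decide
    | cons c r => exact absurd hl (by simp)
  | succ n ih =>
    intro cs hl
    by_cases hmem : '\n' ∈ cs
    · obtain ⟨d0, d', hdd⟩ : ∃ d0 d', cs.dropWhile (fun c => decide (c ≠ '\n')) = d0 :: d' := by
        rcases hdw : cs.dropWhile (fun c => decide (c ≠ '\n')) with _ | ⟨d0, d'⟩
        · exfalso
          have hcs := List.takeWhile_append_dropWhile (p := fun c => decide (c ≠ '\n')) (l := cs)
          rw [hdw, List.append_nil] at hcs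
          rw [← hcs] at hmem
          have := List.mem_takeWhile_imp hmem
          simp at this
        · exact ⟨d0, d', rfl⟩
      have hd : cs.dropWhile (fun c => decide (c ≠ '\n')) ≠ [] := by rw [hdd]; simp
      have hh := List.head_dropWhile_not (fun c => decide (c ≠ '\n')) (l := cs) hd
      have h1 : (cs.dropWhile (fun c => decide (c ≠ '\n'))).head? = some d0 := by rw [hdd]; rfl
      have h2 := List.head?_eq_some_head (l := cs.dropWhile (fun c => decide (c ≠ '\n'))) hd
      rw [h1] at h2
      have h3 : (cs.dropWhile (fun c => decide (c ≠ '\n'))).head hd = d0 := (Option.some.inj h2).symm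
      rw [h3] at hh
      have hd0 : d0 = '\n' := by simpa using hh
      subst hd0
      have hnl : '\n' ∉ cs.takeWhile (fun c => decide (c ≠ '\n')) := by
        intro h
        have := List.mem_takeWhile_imp h
        simp at this
      have hcs : cs = cs.takeWhile (fun c => decide (c ≠ '\n')) ++ '\n' :: d' := by
        conv_lhs => rw [← List.takeWhile_append_dropWhile (p := fun c => decide (c ≠ '\n')) (l := cs)]
        rw [hdd]
      have hlen : d'.length ≤ n := by
        have hlcs : cs.length = (cs.takeWhile (fun c => decide (c ≠ '\n'))).length + 1 + d'.length := by
          conv_lhs => rw [hcs]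
          simp only [List.length_append, List.length_cons]
          omega
        omega
      rw [hcs, pvStrip_cut _ d' hnl, pvSplitOn_cut _ d' hnl,
        pvStrip_noNL (cs.takeWhile (fun c => decide (c ≠ '\n'))).length _ (le_refl _) hnl,
        ih d' hlen]
      obtain ⟨q, qs, hq⟩ := List.exists_cons_of_ne_nil (pvSplitOn_ne_nil d')
      rw [hq]
      simp only [List.map_cons]
      rw [PySem.Chars.join_cons_cons]
      simp
    · rw [pvSplitOn_noNL cs hmem, List.map_singleton, PySem.Chars.join_singleton,
        pvStrip_noNL cs.length cs (le_refl _) hmem]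

theorem pvSplit?_eq (s : List Char) :
    PySem.Chars.split? s ['\n'] = some (PySem.Chars.splitOn s ['\n']) := rfl

-- A's per-line transformation, moved to the char-list side
theorem pvLine_toList (line : String) :
    (if PySem.Str.find line "--" ≠ -1 then
      PySem.Str.slice line none (some (PySem.Str.find line "--")) else line).toList
      = pvLineA line.toList := by
  have hdd : "--".toList = ['-', '-'] := by decide
  have hfind : PySem.Str.find line "--" = PySem.Chars.find line.toList ['-', '-'] := by
    rw [PySem.Str.find_eq, hdd]
  by_cases hf : PySem.Chars.find line.toList ['-', '-'] ≠ -1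
  · rw [if_pos (by rw [hfind]; exact hf), pvLineA, if_pos hf, PySem.Str.toList_slice, hfind]
    simp
  · rw [if_neg (by rw [hfind]; exact hf), pvLineA, if_neg hf]

-- ===== VERDICT (by name: the statement is the Claim_ definition above) =====
theorem preprocess_vhdl_spec : Claim_equal_preprocess_vhdl := by
  intro text _
  unfold Spec_preprocess_vhdl preprocess_vhdl preprocess_vhdl_alt
  rw [← String.toList_inj]
  rcases hsp : PySem.Str.split? text "\n" with _ | lines
  · exfalso
    have h := PySem.Str.split?_map text "\n"
    rw [hsp, show ("\n".toList) = ['\n'] from rfl, pvSplit?_eq] at h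
    simp at h
  · have h := PySem.Str.split?_map text "\n"
    rw [hsp, show ("\n".toList) = ['\n'] from rfl, pvSplit?_eq] at h
    have hmap : lines.map String.toList = PySem.Chars.splitOn text.toList ['\n'] := by
      simpa using h
    simp only [Option.getD_some]
    rw [PySem.List.foldl_append_singleton_eq_map
      (f := fun line => if PySem.Str.find line "--" ≠ -1 then
        PySem.Str.slice line none (some (PySem.Str.find line "--")) else line)]
    rw [List.nil_append, PySem.Str.toList_join, show ("\n".toList) = ['\n'] from rfl,
      List.map_map]
    have hcong : lines.map (String.toList ∘ fun line =>
        if PySem.Str.find line "--" ≠ -1 then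
          PySem.Str.slice line none (some (PySem.Str.find line "--")) else line)
        = lines.map (pvLineA ∘ String.toList) := by
      apply List.map_congr_left
      intro line _
      exact pvLine_toList line
    rw [hcong, ← List.map_map, hmap]
    have hofl : (String.ofList (pvStrip text.toList)).toList = pvStrip text.toList := by simp
    rw [hofl]
    exact (pvStrip_join text.toList.length text.toList (le_refl _)).symm
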